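-- pv_equiv track=rewrite | github.com/vincentwongso/agent-trading-skills | src/trading_agent_skills/price_action/structure.py | classify_mtf_alignment
-- ===== SOURCE A (Python) =====
-- from typing import Literal
--
-- RegimeKind = Literal["trend_up", "trend_down", "range", "transition"]
--
-- MTFAlignment = Literal["aligned_long", "aligned_short", "mixed", "conflicted"]
--
-- def classify_mtf_alignment(regime_by_tf: dict[str, RegimeKind]) -> MTFAlignment:
--     """Reduce per-TF regimes to one of four overall states."""
--     if not regime_by_tf:
--         return "conflicted"
--     regimes = list(regime_by_tf.values())
--     if all(r == "trend_up" for r in regimes):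
--         return "aligned_long"
--     if all(r == "trend_down" for r in regimes):
--         return "aligned_short"
--     has_up = any(r == "trend_up" for r in regimes)
--     has_down = any(r == "trend_down" for r in regimes)
--     if has_up and has_down:
--         return "conflicted"
--     return "mixed"
-- ===== SOURCE B (Python) =====
-- def classify_mtf_alignment(regime_by_tf):
--     """Reduce per-TF regimes to one of four overall states (single tallying pass)."""
--     if not regime_by_tf:
--         return "conflicted"
--     total = 0
--     up = 0
--     down = 0
--     for r in regime_by_tf.values():
--         total += 1
--         if r == "trend_up":
--             up += 1
--         elif r == "trend_down":
--             down += 1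
--     if up == total:
--         return "aligned_long"
--     if down == total:
--         return "aligned_short"
--     if up > 0 and down > 0:
--         return "conflicted"
--     return "mixed"
-- ===== Notes on version B (the rewrite author's own statement) =====
-- stated objective: alternative
-- what changed: Replaces A's four separate all/any scans over the regimes with one tallying pass (total/up/down counters) followed by arithmetic on the counts.
import Mathlib
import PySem

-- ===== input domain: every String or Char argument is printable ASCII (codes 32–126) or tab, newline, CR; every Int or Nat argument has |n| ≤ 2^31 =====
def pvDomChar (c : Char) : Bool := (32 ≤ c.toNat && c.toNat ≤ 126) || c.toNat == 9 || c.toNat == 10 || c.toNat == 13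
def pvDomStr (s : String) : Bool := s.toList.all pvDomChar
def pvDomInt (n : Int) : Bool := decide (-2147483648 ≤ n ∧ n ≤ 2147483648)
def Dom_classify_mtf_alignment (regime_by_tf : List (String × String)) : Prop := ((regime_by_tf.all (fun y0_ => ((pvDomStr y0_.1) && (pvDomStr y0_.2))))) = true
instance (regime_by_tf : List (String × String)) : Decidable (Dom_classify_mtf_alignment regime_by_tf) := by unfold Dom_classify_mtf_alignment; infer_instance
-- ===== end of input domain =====

-- ===== PORT A =====
-- B replaces A's four all/any scans with one counting pass over the values; same O(n) cost (objective: alternative).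
def classify_mtf_alignment (regime_by_tf : List (String × String)) : String :=
  if regime_by_tf = [] then "conflicted"
  else
    let regimes := regime_by_tf.map (fun kv => kv.2)
    if regimes.all (fun r => r == "trend_up") then "aligned_long"
    else if regimes.all (fun r => r == "trend_down") then "aligned_short"
    else
      let has_up := regimes.any (fun r => r == "trend_up")
      let has_down := regimes.any (fun r => r == "trend_down")
      if has_up && has_down then "conflicted" else "mixed"

-- ===== PORT B =====
-- loop body of B: bump total and the matching regime counter
def pvTallyStep (acc : Int × Int × Int) (kv : String × String) : Int × Int × Int :=
  if kv.2 == "trend_up" then (acc.1 + 1, acc.2.1 + 1, acc.2.2)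
  else if kv.2 == "trend_down" then (acc.1 + 1, acc.2.1, acc.2.2 + 1)
  else (acc.1 + 1, acc.2.1, acc.2.2)

-- one pass accumulating (total, up, down), then decide from the tallies
def classify_mtf_alignment_alt (regime_by_tf : List (String × String)) : String :=
  if regime_by_tf = [] then "conflicted"
  else
    let t := regime_by_tf.foldl pvTallyStep (0, 0, 0)
    if t.2.1 = t.1 then "aligned_long"
    else if t.2.2 = t.1 then "aligned_short"
    else if t.2.1 > 0 ∧ t.2.2 > 0 then "conflicted"
    else "mixed"

-- ===== PRECONDITION & SPEC =====
def Spec_classify_mtf_alignment (regime_by_tf : List (String × String)) (out : String) : Prop := out = classify_mtf_alignment_alt regime_by_tf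
instance (regime_by_tf : List (String × String)) (out : String) : Decidable (Spec_classify_mtf_alignment regime_by_tf out) := by unfold Spec_classify_mtf_alignment; infer_instance

-- ===== CLAIM =====
def Claim_equal_classify_mtf_alignment : Prop := ∀ (regime_by_tf : List (String × String)), Dom_classify_mtf_alignment regime_by_tf → Spec_classify_mtf_alignment regime_by_tf (classify_mtf_alignment regime_by_tf)

-- ===== LEMMAS AND PROOFS =====
-- the tally fold computes (t0 + |l|, u0 + #trend_up, d0 + #trend_down)
theorem pv_fold_counts (l : List (String × String)) (t0 u0 d0 : Int) :
    l.foldl pvTallyStep (t0, u0, d0)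
    = (t0 + l.length, u0 + (l.countP (fun kv => kv.2 == "trend_up") : Int),
       d0 + (l.countP (fun kv => kv.2 == "trend_down") : Int)) := by
  induction l generalizing t0 u0 d0 with
  | nil => simp
  | cons hd tl ih =>
    by_cases h1 : hd.2 = "trend_up"
    · simp only [List.foldl_cons, pvTallyStep, h1, List.countP_cons]
      simp only [ih]
      simp
      constructor <;> ring
    · by_cases h2 : hd.2 = "trend_down"
      · simp only [List.foldl_cons, pvTallyStep, h2, List.countP_cons]
        simp only [beq_iff_eq, h2]
        simp only [ih]
        simp
        constructor <;> ring
      · simp only [List.foldl_cons, pvTallyStep, List.countP_cons]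
        simp only [beq_iff_eq, h2]
        simp only [ih]
        simp [h1, h2]
        ring

-- A's all(...) scan agrees with comparing the count to the length
theorem pv_all_count (l : List (String × String)) (s : String) :
    ((l.map (fun kv => kv.2)).all (fun r => r == s))
    = decide (l.countP (fun kv => kv.2 == s) = l.length) := by
  induction l with
  | nil => simp
  | cons hd tl ih =>
    have hle : tl.countP (fun kv => kv.2 == s) ≤ tl.length := List.countP_le_length
    simp only [List.map_cons, List.all_cons, List.countP_cons, List.length_cons]
    by_cases h : hd.2 = s
    · simp [h, ih]
    · have hb : (hd.2 == s) = false := by simpa using h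
      simp [hb]
      omega

-- A's any(...) scan agrees with positivity of the count
theorem pv_any_count (l : List (String × String)) (s : String) :
    ((l.map (fun kv => kv.2)).any (fun r => r == s))
    = decide (0 < l.countP (fun kv => kv.2 == s)) := by
  induction l with
  | nil => simp
  | cons hd tl ih =>
    simp only [List.map_cons, List.any_cons, List.countP_cons]
    by_cases h : hd.2 = s
    · simp [h]
    · have hb : (hd.2 == s) = false := by simpa using h
      simp [hb, ih]

-- ===== VERDICT =====
theorem classify_mtf_alignment_spec : Claim_equal_classify_mtf_alignment := by
  intro l _
  unfold Spec_classify_mtf_alignment classify_mtf_alignment classify_mtf_alignment_alt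
  by_cases hnil : l = []
  · simp [hnil]
  · have hn : l.length ≠ 0 := by simpa using hnil
    have hle1 : l.countP (fun kv => kv.2 == "trend_up") ≤ l.length := List.countP_le_length
    have hle2 : l.countP (fun kv => kv.2 == "trend_down") ≤ l.length := List.countP_le_length
    simp only [hnil, if_false, pv_fold_counts, pv_all_count, pv_any_count, zero_add]
    simp only [Bool.and_eq_true, decide_eq_true_eq]
    split_ifs <;> first | rfl | omega
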